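-- pv_equiv track=rewrite | github.com/huggin/gfg | tree/print_binary_tree_levels_sorted_order.py | binTreeSortedLevels
-- ===== SOURCE A (Python) =====
-- def binTreeSortedLevels(arr, n):
--     # code here.
--     ans = []
--     m = 1
--     level = []
--     j = 0
--     for i in range(n):
--         if j < m:
--             level.append(arr[i])
--             j += 1
--         else:
--             level.sort()
--             ans.append(level.copy())
--             level.clear()
--             m += m
--             j = 1
--             level.append(arr[i])
--
--     level.sort()
--     ans.append(level)
--
--     return ans
-- ===== SOURCE B (Python) =====
-- def binTreeSortedLevels(arr, n):
--     # Level-by-level: slice out each doubling-size chunk and sort it.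
--     nn = n if n > 0 else 0
--     ans = []
--     i, size = 0, 1
--     while True:
--         j = min(i + size, nn)
--         ans.append(sorted(arr[i:j]))
--         if j >= nn:
--             return ans
--         i, size = j, size * 2
-- ===== Notes on version B (the rewrite author's own statement) =====
-- stated objective: alternative
-- what changed: B iterates level-by-level, slicing out each doubling-size chunk and sorting it, instead of A's flat per-element pass that maintains a capacity counter and flushes/sorts the accumulating level on the boundary element.
import Mathlib
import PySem

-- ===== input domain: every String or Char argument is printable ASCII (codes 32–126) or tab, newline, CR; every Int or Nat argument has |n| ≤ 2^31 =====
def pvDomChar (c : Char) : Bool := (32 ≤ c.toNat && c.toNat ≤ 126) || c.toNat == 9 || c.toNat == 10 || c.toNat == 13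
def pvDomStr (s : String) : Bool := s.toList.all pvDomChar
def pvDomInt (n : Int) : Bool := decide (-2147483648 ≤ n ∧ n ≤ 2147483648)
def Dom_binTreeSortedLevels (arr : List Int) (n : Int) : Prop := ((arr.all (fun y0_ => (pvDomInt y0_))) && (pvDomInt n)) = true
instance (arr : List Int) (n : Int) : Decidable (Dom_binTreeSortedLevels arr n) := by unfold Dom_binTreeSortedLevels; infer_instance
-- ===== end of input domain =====

-- B builds each doubling-size level by slicing and sorting it (nested level loop) instead of
-- A's flat per-element pass with a flush counter; same values, different decomposition.

-- ===== PORT A =====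
-- loop body of A; state is (ans, m, level, j)
def stepA (arr : List Int) (s : List (List Int) × Int × List Int × Int) (i : Int) :
    List (List Int) × Int × List Int × Int :=
  if s.2.2.2 < s.2.1 then
    (s.1, s.2.1, s.2.2.1 ++ [(PySem.List.pyGet? arr i).getD 0], s.2.2.2 + 1)
  else
    (s.1 ++ [PySem.List.sorted s.2.2.1 (fun x => x) false], s.2.1 + s.2.1,
      [(PySem.List.pyGet? arr i).getD 0], 1)

def binTreeSortedLevels (arr : List Int) (n : Int) : List (List Int) :=
  let st := (PySem.List.pyRange 0 n 1).foldl (stepA arr) ([], 1, [], 0)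
  st.1 ++ [PySem.List.sorted st.2.2.1 (fun x => x) false]

-- ===== PORT B =====
-- the while-True loop of Source B; fuel is termination bookkeeping only (nn+1 always suffices:
-- i strictly increases towards nn each iteration)
def bTSLoop (arr : List Int) (nn : Int) : Nat → Int → Int → List (List Int)
  | 0, _, _ => []
  | fuel + 1, i, size =>
    let j := min (i + size) nn
    let lvl := PySem.List.sorted (PySem.List.slice arr (some i) (some j)) (fun x => x) false
    if nn ≤ j then [lvl] else lvl :: bTSLoop arr nn fuel j (size * 2)

def binTreeSortedLevels_alt (arr : List Int) (n : Int) : List (List Int) :=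
  let nn := if n > 0 then n else 0
  bTSLoop arr nn (nn.toNat + 1) 0 1

-- ===== PRECONDITION & SPEC =====
-- A raises IndexError (arr[i] for i ≥ len(arr)) exactly when n > len(arr); excluded.
def Pre_binTreeSortedLevels (arr : List Int) (n : Int) : Prop := n ≤ (arr.length : Int)
instance (arr : List Int) (n : Int) : Decidable (Pre_binTreeSortedLevels arr n) := by unfold Pre_binTreeSortedLevels; infer_instance
def pvWitness_binTreeSortedLevels : List Int × Int := ([5, 2, 7, 1, 4], 5)

def Spec_binTreeSortedLevels (arr : List Int) (n : Int) (out : List (List Int)) : Prop := out = binTreeSortedLevels_alt arr n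
instance (arr : List Int) (n : Int) (out : List (List Int)) : Decidable (Spec_binTreeSortedLevels arr n out) := by unfold Spec_binTreeSortedLevels; infer_instance

-- ===== CLAIM (what is proved, stated in full; the proofs are below) =====
def Claim_equal_binTreeSortedLevels : Prop := ∀ (arr : List Int) (n : Int), Dom_binTreeSortedLevels arr n → Pre_binTreeSortedLevels arr n → Spec_binTreeSortedLevels arr n (binTreeSortedLevels arr n)

-- ===== LEMMAS AND PROOFS =====

-- A's flat pass, rephrased as structural recursion over the remaining indices
def levelsA (arr : List Int) (nn i size : Int) (P : List Int) : List (List Int) :=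
  if _h : nn ≤ i then [PySem.List.sorted P (fun x => x) false]
  else if (P.length : Int) < size then
    levelsA arr nn (i + 1) size (P ++ [(PySem.List.pyGet? arr i).getD 0])
  else
    PySem.List.sorted P (fun x => x) false ::
      levelsA arr nn (i + 1) (size * 2) [(PySem.List.pyGet? arr i).getD 0]
termination_by (nn - i).toNat
decreasing_by all_goals omega

theorem foldA_levelsA (arr : List Int) (nn : Int) :
    ∀ (c : Nat) (i size : Int) (ans : List (List Int)) (P : List Int),
      (nn - i).toNat = c →
      (((PySem.List.pyRange i nn 1).foldl (stepA arr) (ans, size, P, (P.length : Int))).1 ++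
        [PySem.List.sorted ((PySem.List.pyRange i nn 1).foldl (stepA arr) (ans, size, P, (P.length : Int))).2.2.1 (fun x => x) false]) =
      ans ++ levelsA arr nn i size P := by
  intro c
  induction c with
  | zero =>
    intro i size ans P hc
    have hle : nn ≤ i := by omega
    rw [PySem.List.pyRange_one_eq_nil hle]
    simp [levelsA, hle]
  | succ c ih =>
    intro i size ans P hc
    have hlt : i < nn := by omega
    rw [PySem.List.pyRange_one_cons hlt]
    simp only [List.foldl_cons]
    by_cases hb : (P.length : Int) < size
    · have hstep : stepA arr (ans, size, P, (P.length : Int)) i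
          = (ans, size, P ++ [(PySem.List.pyGet? arr i).getD 0],
              (((P ++ [(PySem.List.pyGet? arr i).getD 0]).length : Nat) : Int)) := by
        simp [stepA, hb]
      rw [hstep, ih (i + 1) size ans (P ++ [(PySem.List.pyGet? arr i).getD 0]) (by omega)]
      conv_rhs => rw [levelsA]
      rw [dif_neg (by omega), if_pos hb]
    · have hstep : stepA arr (ans, size, P, (P.length : Int)) i
          = (ans ++ [PySem.List.sorted P (fun x => x) false], size * 2,
              [(PySem.List.pyGet? arr i).getD 0],
              (([(PySem.List.pyGet? arr i).getD 0].length : Nat) : Int)) := by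
        simp [stepA, hb]; ring
      rw [hstep, ih (i + 1) (size * 2) _ [(PySem.List.pyGet? arr i).getD 0] (by omega)]
      conv_rhs => rw [levelsA]
      rw [dif_neg (by omega), if_neg hb]
      simp

-- peeling the first element off a slice window
theorem slice_cons_of_lt (arr : List Int) (i j : Int) (h0 : 0 ≤ i) (hij : i < j)
    (hlen : i < (arr.length : Int)) :
    PySem.List.slice arr (some i) (some j) =
      (PySem.List.pyGet? arr i).getD 0 :: PySem.List.slice arr (some (i + 1)) (some j) := by
  have hi : i.toNat < arr.length := by omega
  rw [PySem.List.slice_toNat arr h0 (by omega : (0:Int) ≤ j),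
      PySem.List.slice_toNat arr (by omega : (0:Int) ≤ i + 1) (by omega : (0:Int) ≤ j)]
  have h1 : (i + 1).toNat = i.toNat + 1 := by omega
  rw [h1]
  rw [List.drop_eq_getElem_cons hi]
  have hget : (PySem.List.pyGet? arr i).getD 0 = arr[i.toNat] := by
    have : PySem.List.pyGet? arr i = some arr[i.toNat] := by
      simp [PySem.List.pyGet?, PySem.List.pyIdx?, h0, hlen]
    rw [this]; rfl
  rw [hget]
  have ht : j.toNat - i.toNat = (j.toNat - (i.toNat + 1)) + 1 := by omega
  rw [ht, List.take_succ_cons]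

-- collapse levelsA's per-element filling into whole levels P ++ arr[i:j]
theorem levelsA_fill (arr : List Int) (nn : Int) (hnn : nn ≤ (arr.length : Int)) :
    ∀ (c : Nat) (i size : Int) (P : List Int),
      (nn - i).toNat = c → 0 ≤ i → i ≤ nn → (P.length : Int) ≤ size →
      levelsA arr nn i size P =
        (if nn ≤ min (i + (size - P.length)) nn then
          [PySem.List.sorted (P ++ PySem.List.slice arr (some i) (some (min (i + (size - P.length)) nn))) (fun x => x) false]
        else
          PySem.List.sorted (P ++ PySem.List.slice arr (some i) (some (min (i + (size - P.length)) nn))) (fun x => x) false ::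
            levelsA arr nn (min (i + (size - P.length)) nn + 1) (size * 2)
              [(PySem.List.pyGet? arr (min (i + (size - P.length)) nn)).getD 0]) := by
  intro c
  induction c with
  | zero =>
    intro i size P hc h0 hle hlen
    have hi : i = nn := by omega
    have hmin : min (i + (size - (P.length : Int))) nn = nn := by omega
    rw [hmin, if_pos (le_refl nn)]
    subst hi
    rw [levelsA]
    have hsl : PySem.List.slice arr (some i) (some i) = [] := by
      rw [PySem.List.slice_toNat arr (by omega : (0:Int) ≤ i) (by omega : (0:Int) ≤ i)]; simp
    simp [hsl]
  | succ c ih =>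
    intro i size P hc h0 hle hlen
    have hlt : i < nn := by omega
    rw [levelsA, dif_neg (by omega)]
    by_cases hb : (P.length : Int) < size
    · rw [if_pos hb]
      rw [ih (i + 1) size (P ++ [(PySem.List.pyGet? arr i).getD 0]) (by omega)
        (by omega) (by omega) (by simp; omega)]
      have hmin : min (i + 1 + (size - (((P ++ [(PySem.List.pyGet? arr i).getD 0]).length : Nat) : Int))) nn
          = min (i + (size - (P.length : Int))) nn := by
        simp; omega
      rw [hmin]
      have hcons : P ++ [(PySem.List.pyGet? arr i).getD 0] ++ PySem.List.slice arr (some (i + 1)) (some (min (i + (size - (P.length : Int))) nn))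
          = P ++ PySem.List.slice arr (some i) (some (min (i + (size - (P.length : Int))) nn)) := by
        rw [List.append_assoc]
        congr 1
        rw [slice_cons_of_lt arr i _ h0 (by omega) (by omega)]
        rfl
      rw [hcons]
    · rw [if_neg hb]
      have hmin : min (i + (size - (P.length : Int))) nn = i := by omega
      rw [hmin, if_neg (by omega)]
      have hslice : PySem.List.slice arr (some i) (some i) = [] := by
        rw [PySem.List.slice_toNat arr (by omega) (by omega)]; simp
      rw [hslice, List.append_nil]

-- levelsA is exactly B's loop (second conjunct handles the one pending element after a flush)
theorem levelsA_eq_bTSLoop (arr : List Int) (nn : Int) (hnn : nn ≤ (arr.length : Int)) :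
    ∀ (c : Nat) (i size : Int) (fuel : Nat),
      (nn - i).toNat = c → c < fuel → 0 ≤ i → i ≤ nn → 1 ≤ size →
      levelsA arr nn i size [] = bTSLoop arr nn fuel i size ∧
      (i < nn →
        levelsA arr nn (i + 1) size [(PySem.List.pyGet? arr i).getD 0] = bTSLoop arr nn fuel i size) := by
  intro c
  induction c using Nat.strong_induction_on with
  | _ c ih =>
    intro i size fuel hc hfuel h0 hle hs
    obtain ⟨f, rfl⟩ : ∃ f, fuel = f + 1 := ⟨fuel - 1, by omega⟩
    constructor
    · rw [levelsA_fill arr nn hnn c i size [] hc h0 hle (by simp; omega)]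
      show _ = if nn ≤ min (i + size) nn then _ else _
      simp only [List.length_nil, Nat.cast_zero, sub_zero, List.nil_append]
      by_cases hend : nn ≤ min (i + size) nn
      · rw [if_pos hend, if_pos hend]
      · rw [if_neg hend, if_neg hend]
        congr 1
        have hjlt : min (i + size) nn < nn := by omega
        have hcc : (nn - min (i + size) nn).toNat < c := by omega
        exact (ih _ hcc (min (i + size) nn) (size * 2) f rfl (by omega) (by omega)
          (by omega) (by omega)).2 hjlt
    · intro hlt
      rw [levelsA_fill arr nn hnn (c - 1) (i + 1) size [(PySem.List.pyGet? arr i).getD 0]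
          (by omega) (by omega) (by omega) (by simp; omega)]
      have hm : min (i + 1 + (size - (([(PySem.List.pyGet? arr i).getD 0].length : Nat) : Int))) nn
          = min (i + size) nn := by simp
      rw [hm]
      have hcons : [(PySem.List.pyGet? arr i).getD 0] ++ PySem.List.slice arr (some (i + 1)) (some (min (i + size) nn))
          = PySem.List.slice arr (some i) (some (min (i + size) nn)) := by
        rw [slice_cons_of_lt arr i _ h0 (by omega) (by omega)]
        rfl
      rw [hcons]
      show _ = if nn ≤ min (i + size) nn then _ else _
      by_cases hend : nn ≤ min (i + size) nn
      · rw [if_pos hend, if_pos hend]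
      · rw [if_neg hend, if_neg hend]
        congr 1
        have hjlt : min (i + size) nn < nn := by omega
        have hcc : (nn - min (i + size) nn).toNat < c := by omega
        exact (ih _ hcc (min (i + size) nn) (size * 2) f rfl (by omega) (by omega)
          (by omega) (by omega)).2 hjlt

-- ===== VERDICT (by name: the statement is the Claim_ definition above) =====
theorem binTreeSortedLevels_spec : Claim_equal_binTreeSortedLevels := by
  intro arr n _ hpre
  unfold Spec_binTreeSortedLevels binTreeSortedLevels binTreeSortedLevels_alt
  by_cases hn : n > 0
  · rw [if_pos hn]
    have hA := foldA_levelsA arr n n.toNat 0 1 [] [] (by omega)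
    simp only [List.length_nil, Nat.cast_zero] at hA
    simp only []
    rw [hA, List.nil_append]
    exact (levelsA_eq_bTSLoop arr n hpre n.toNat 0 1 (n.toNat + 1) (by omega) (by omega)
      (by omega) (by omega) (by omega)).1
  · rw [if_neg hn]
    rw [PySem.List.pyRange_one_eq_nil (by omega)]
    simp [bTSLoop, PySem.List.slice_to]
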